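-- pv_equiv track=rewrite | github.com/Bartek-M/Advent-Of-Code | 2023/day_1.py | verify_num
-- ===== SOURCE A (Python) =====
-- digits = ["one", "two", "three", "four", "five", "six", "seven", "eight", "nine"]
--
-- def verify_num(text):
--     for num, digit in enumerate(digits):
--         if len(text) < len(digit):
--             continue
--
--         if text[:len(digit)] != digit:
--             continue
--
--         return str(num+1)
--
--     return None
-- ===== SOURCE B (Python) =====
-- def verify_num(text):
--     c = text[:1]
--     if c == "o":
--         return "1" if text.startswith("one") else None
--     if c == "t":
--         if text.startswith("two"):
--             return "2"
--         if text.startswith("three"):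
--             return "3"
--         return None
--     if c == "f":
--         if text.startswith("four"):
--             return "4"
--         if text.startswith("five"):
--             return "5"
--         return None
--     if c == "s":
--         if text.startswith("six"):
--             return "6"
--         if text.startswith("seven"):
--             return "7"
--         return None
--     if c == "e":
--         return "8" if text.startswith("eight") else None
--     if c == "n":
--         return "9" if text.startswith("nine") else None
--     return None
-- ===== Notes on version B (the rewrite author's own statement) =====
-- stated objective: alternative
-- what changed: Replaces A's scan over the enumerated list of all nine digit words with a first-letter dispatch (a one-level trie): branch on text[:1] and test only the one or two words starting with that letter via startswith; correct because the digit words are mutually non-prefixing so at most one can match.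
import Mathlib
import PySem

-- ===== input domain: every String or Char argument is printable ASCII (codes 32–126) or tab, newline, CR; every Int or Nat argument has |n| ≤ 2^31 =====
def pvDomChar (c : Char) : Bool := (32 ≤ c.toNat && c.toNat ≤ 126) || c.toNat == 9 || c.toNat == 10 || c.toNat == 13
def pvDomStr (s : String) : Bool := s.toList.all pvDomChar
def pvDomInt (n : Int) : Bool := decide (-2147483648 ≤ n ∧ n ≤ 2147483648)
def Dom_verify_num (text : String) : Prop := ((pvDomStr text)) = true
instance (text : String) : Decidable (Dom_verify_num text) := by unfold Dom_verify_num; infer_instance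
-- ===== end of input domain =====

-- B replaces A's scan over the enumerated list of all nine digit words by a first-letter
-- dispatch (a one-level trie): branch on text[:1] and test only the one or two words
-- starting with that letter; correct because the digit words are mutually non-prefixing.

-- ===== PORT A =====
-- the module constant `digits` (strings as their code-point lists)
def pvDigits : List (List Char) :=
  [['o','n','e'], ['t','w','o'], ['t','h','r','e','e'], ['f','o','u','r'],
   ['f','i','v','e'], ['s','i','x'], ['s','e','v','e','n'], ['e','i','g','h','t'],
   ['n','i','n','e']]

-- the `for num, digit in enumerate(digits)` loop, body step for step (both `continue`s kept)
def verify_num_go (l : List Char) : List (Int × List Char) → Option String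
  | [] => none
  | (num, digit) :: rest =>
    if l.length < digit.length then verify_num_go l rest
    else if PySem.List.slice l none (some (digit.length : Int)) ≠ digit then verify_num_go l rest
    else some (PySem.Int.toStr (num + 1))

def verify_num (text : String) : Option String :=
  verify_num_go text.toList (PySem.List.enumerate pvDigits 0)

-- ===== PORT B =====
-- Source B: c = text[:1]; then a first-letter if-chain, each branch testing its word(s) with startswith
def verify_num_alt_core (l : List Char) : Option String :=
  let c := PySem.List.slice l none (some 1)
  if c = ['o'] then
    (if PySem.Chars.startswith l ['o','n','e'] then some "1" else none)
  else if c = ['t'] then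
    (if PySem.Chars.startswith l ['t','w','o'] then some "2"
     else if PySem.Chars.startswith l ['t','h','r','e','e'] then some "3"
     else none)
  else if c = ['f'] then
    (if PySem.Chars.startswith l ['f','o','u','r'] then some "4"
     else if PySem.Chars.startswith l ['f','i','v','e'] then some "5"
     else none)
  else if c = ['s'] then
    (if PySem.Chars.startswith l ['s','i','x'] then some "6"
     else if PySem.Chars.startswith l ['s','e','v','e','n'] then some "7"
     else none)
  else if c = ['e'] then
    (if PySem.Chars.startswith l ['e','i','g','h','t'] then some "8" else none)
  else if c = ['n'] then
    (if PySem.Chars.startswith l ['n','i','n','e'] then some "9" else none)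
  else none

def verify_num_alt (text : String) : Option String :=
  verify_num_alt_core text.toList

-- ===== PRECONDITION & SPEC =====
def Spec_verify_num (text : String) (out : Option String) : Prop := out = verify_num_alt text
instance (text : String) (out : Option String) : Decidable (Spec_verify_num text out) := by unfold Spec_verify_num; infer_instance

-- ===== CLAIM (what is proved, stated in full; the proofs are below) =====
def Claim_equal_verify_num : Prop := ∀ (text : String), Dom_verify_num text → Spec_verify_num text (verify_num text)

-- ===== LEMMAS AND PROOFS =====
theorem pv_sw_iff (l w : List Char) :
    PySem.Chars.startswith l w = true ↔ l.take w.length = w := by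
  rw [PySem.Chars.startswith_iff, List.prefix_iff_eq_take, eq_comm]

theorem pv_take_min {l w : List Char} {k : Nat} (h : l.take k = w) :
    w.length = min k l.length := by
  have := congrArg List.length h
  simpa [List.length_take] using this.symm

theorem pv_not_lt {l w : List Char} {k : Nat} (h : l.take k = w) (hw : w.length = k) :
    ¬ l.length < k := by
  have hm := pv_take_min h; omega

theorem pv_take_of_take {l w : List Char} {a b : Nat} (h : l.take b = w) (hab : a ≤ b) :
    l.take a = w.take a := by
  rw [← h, List.take_take, Nat.min_eq_left hab]

theorem pv_take_min_eq (l : List Char) (k : Nat) : l.take (min k l.length) = l.take k := by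
  rcases Nat.le_total k l.length with h | h
  · rw [Nat.min_eq_left h]
  · rw [Nat.min_eq_right h, List.take_of_length_le h, List.take_of_length_le (Nat.le_refl _)]

-- `startswith l w = false` from a known mismatch at a take of the same or another length
theorem pv_sw_false_of_take_ne {l w : List Char} (h : l.take w.length ≠ w) :
    PySem.Chars.startswith l w = false := by
  rw [← Bool.not_eq_true, pv_sw_iff]; exact h

theorem pv_sw_true_of_take {l w : List Char} (h : l.take w.length = w) :
    PySem.Chars.startswith l w = true := (pv_sw_iff l w).mpr h

set_option maxHeartbeats 2000000 in
theorem core_eq (l : List Char) :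
    verify_num_go l (PySem.List.enumerate pvDigits 0) = verify_num_alt_core l := by
  by_cases hone : l.take 3 = ['o','n','e']
  · have g : ¬ l.length < 3 := pv_not_lt hone (by decide)
    have c1 : l.take 1 = ['o'] := by rw [pv_take_of_take hone (by omega)]; decide
    have sw := pv_sw_true_of_take (w := ['o','n','e']) hone
    simp [verify_num_go, verify_num_alt_core, pvDigits, PySem.List.enumerate_cons,
      PySem.List.enumerate_nil, PySem.List.slice, PySem.List.clampIdx,
      pv_take_min_eq, hone, c1, sw, g] <;> decide
  · by_cases htwo : l.take 3 = ['t','w','o']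
    · have g : ¬ l.length < 3 := pv_not_lt htwo (by decide)
      have c1 : l.take 1 = ['t'] := by rw [pv_take_of_take htwo (by omega)]; decide
      have sw := pv_sw_true_of_take (w := ['t','w','o']) htwo
      simp [verify_num_go, verify_num_alt_core, pvDigits, PySem.List.enumerate_cons,
        PySem.List.enumerate_nil, PySem.List.slice, PySem.List.clampIdx,
        pv_take_min_eq, hone, htwo, c1, sw, g] <;> decide
    · by_cases hthree : l.take 5 = ['t','h','r','e','e']
      · have g : ¬ l.length < 5 := pv_not_lt hthree (by decide)
        have c1 : l.take 1 = ['t'] := by rw [pv_take_of_take hthree (by omega)]; decide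
        have e3 : l.take 3 = ['t','h','r'] := by rw [pv_take_of_take hthree (by omega)]; decide
        have sw2 : PySem.Chars.startswith l ['t','w','o'] = false :=
          pv_sw_false_of_take_ne (by rw [show (['t','w','o'] : List Char).length = 3 from rfl, e3]; decide)
        have sw3 := pv_sw_true_of_take (w := ['t','h','r','e','e']) hthree
        simp [verify_num_go, verify_num_alt_core, pvDigits, PySem.List.enumerate_cons,
          PySem.List.enumerate_nil, PySem.List.slice, PySem.List.clampIdx,
          pv_take_min_eq, hthree, e3, c1, sw2, sw3, g] <;> decide
      · by_cases hfour : l.take 4 = ['f','o','u','r']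
        · have g : ¬ l.length < 4 := pv_not_lt hfour (by decide)
          have c1 : l.take 1 = ['f'] := by rw [pv_take_of_take hfour (by omega)]; decide
          have e3 : l.take 3 = ['f','o','u'] := by rw [pv_take_of_take hfour (by omega)]; decide
          have sw := pv_sw_true_of_take (w := ['f','o','u','r']) hfour
          simp [verify_num_go, verify_num_alt_core, pvDigits, PySem.List.enumerate_cons,
            PySem.List.enumerate_nil, PySem.List.slice, PySem.List.clampIdx,
            pv_take_min_eq, hthree, hfour, e3, c1, sw, g] <;> decide
        · by_cases hfive : l.take 4 = ['f','i','v','e']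
          · have g : ¬ l.length < 4 := pv_not_lt hfive (by decide)
            have c1 : l.take 1 = ['f'] := by rw [pv_take_of_take hfive (by omega)]; decide
            have e3 : l.take 3 = ['f','i','v'] := by rw [pv_take_of_take hfive (by omega)]; decide
            have sw4 : PySem.Chars.startswith l ['f','o','u','r'] = false :=
              pv_sw_false_of_take_ne (by rw [show (['f','o','u','r'] : List Char).length = 4 from rfl, hfive]; decide)
            have sw := pv_sw_true_of_take (w := ['f','i','v','e']) hfive
            simp [verify_num_go, verify_num_alt_core, pvDigits, PySem.List.enumerate_cons,
              PySem.List.enumerate_nil, PySem.List.slice, PySem.List.clampIdx,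
              pv_take_min_eq, hthree, hfour, hfive, e3, c1, sw4, sw, g] <;> decide
          · by_cases hsix : l.take 3 = ['s','i','x']
            · have g : ¬ l.length < 3 := pv_not_lt hsix (by decide)
              have c1 : l.take 1 = ['s'] := by rw [pv_take_of_take hsix (by omega)]; decide
              have sw := pv_sw_true_of_take (w := ['s','i','x']) hsix
              simp [verify_num_go, verify_num_alt_core, pvDigits, PySem.List.enumerate_cons,
                PySem.List.enumerate_nil, PySem.List.slice, PySem.List.clampIdx,
                pv_take_min_eq, hone, htwo, hthree, hfour, hfive, hsix, c1, sw, g] <;> decide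
            · by_cases hseven : l.take 5 = ['s','e','v','e','n']
              · have g : ¬ l.length < 5 := pv_not_lt hseven (by decide)
                have c1 : l.take 1 = ['s'] := by rw [pv_take_of_take hseven (by omega)]; decide
                have e3 : l.take 3 = ['s','e','v'] := by rw [pv_take_of_take hseven (by omega)]; decide
                have sw6 : PySem.Chars.startswith l ['s','i','x'] = false :=
                  pv_sw_false_of_take_ne (by rw [show (['s','i','x'] : List Char).length = 3 from rfl, e3]; decide)
                have sw := pv_sw_true_of_take (w := ['s','e','v','e','n']) hseven
                simp [verify_num_go, verify_num_alt_core, pvDigits, PySem.List.enumerate_cons,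
                  PySem.List.enumerate_nil, PySem.List.slice, PySem.List.clampIdx,
                  pv_take_min_eq, hthree, hseven, hfour, hfive, e3, c1, sw6, sw, g] <;> decide
              · by_cases height : l.take 5 = ['e','i','g','h','t']
                · have g : ¬ l.length < 5 := pv_not_lt height (by decide)
                  have c1 : l.take 1 = ['e'] := by rw [pv_take_of_take height (by omega)]; decide
                  have e3 : l.take 3 = ['e','i','g'] := by rw [pv_take_of_take height (by omega)]; decide
                  have sw := pv_sw_true_of_take (w := ['e','i','g','h','t']) height
                  simp [verify_num_go, verify_num_alt_core, pvDigits, PySem.List.enumerate_cons,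
                    PySem.List.enumerate_nil, PySem.List.slice, PySem.List.clampIdx,
                    pv_take_min_eq, hthree, hseven, height, hfour, hfive, e3, c1, sw, g] <;> decide
                · by_cases hnine : l.take 4 = ['n','i','n','e']
                  · have g : ¬ l.length < 4 := pv_not_lt hnine (by decide)
                    have c1 : l.take 1 = ['n'] := by rw [pv_take_of_take hnine (by omega)]; decide
                    have e3 : l.take 3 = ['n','i','n'] := by rw [pv_take_of_take hnine (by omega)]; decide
                    have sw := pv_sw_true_of_take (w := ['n','i','n','e']) hnine
                    simp [verify_num_go, verify_num_alt_core, pvDigits, PySem.List.enumerate_cons,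
                      PySem.List.enumerate_nil, PySem.List.slice, PySem.List.clampIdx,
                      pv_take_min_eq, hthree, hseven, height, hfour, hfive, hnine, e3, c1, sw, g] <;> decide
                  · -- all nine words fail: every startswith is false, so both sides return none
                    have sw1 : PySem.Chars.startswith l ['o','n','e'] = false :=
                      pv_sw_false_of_take_ne hone
                    have sw2 : PySem.Chars.startswith l ['t','w','o'] = false :=
                      pv_sw_false_of_take_ne htwo
                    have sw3 : PySem.Chars.startswith l ['t','h','r','e','e'] = false :=
                      pv_sw_false_of_take_ne hthree
                    have sw4 : PySem.Chars.startswith l ['f','o','u','r'] = false :=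
                      pv_sw_false_of_take_ne hfour
                    have sw5 : PySem.Chars.startswith l ['f','i','v','e'] = false :=
                      pv_sw_false_of_take_ne hfive
                    have sw6 : PySem.Chars.startswith l ['s','i','x'] = false :=
                      pv_sw_false_of_take_ne hsix
                    have sw7 : PySem.Chars.startswith l ['s','e','v','e','n'] = false :=
                      pv_sw_false_of_take_ne hseven
                    have sw8 : PySem.Chars.startswith l ['e','i','g','h','t'] = false :=
                      pv_sw_false_of_take_ne height
                    have sw9 : PySem.Chars.startswith l ['n','i','n','e'] = false :=
                      pv_sw_false_of_take_ne hnine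
                    simp [verify_num_go, verify_num_alt_core, pvDigits, PySem.List.enumerate_cons,
                      PySem.List.enumerate_nil, PySem.List.slice, PySem.List.clampIdx,
                      pv_take_min_eq, hone, htwo, hthree, hfour, hfive, hsix, hseven, height, hnine,
                      sw1, sw2, sw3, sw4, sw5, sw6, sw7, sw8, sw9]

-- ===== VERDICT (by name: the statement is the Claim_ definition above) =====
theorem verify_num_spec : Claim_equal_verify_num := by
  intro text _
  show verify_num text = verify_num_alt text
  exact core_eq text.toList
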